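-- pv_equiv track=rewrite | github.com/ariuk44/retake_exam_prep | day_1.py | isInertial
-- ===== SOURCE A (Python) =====
-- def isInertial(arr):
--     if len(arr) < 2:
--         return 0
--     max_val = max(arr)
--     if max_val % 2 != 0:
--         return 0
--     even_vals = [i for i in arr if i % 2 == 0 and i != max_val]
--     odd_vals = [i for i in arr if i % 2 != 0]
--     if not odd_vals:
--         return 0
--     for odd in odd_vals:
--         for even in even_vals:
--             if even > odd:
--                 return 0
--     return 1
-- ===== SOURCE B (Python) =====
-- def isInertial(arr):
--     if len(arr) < 2:
--         return 0
--     m = max(arr)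
--     if m % 2 != 0:
--         return 0
--     max_even = None
--     min_odd = None
--     for x in arr:
--         if x % 2 != 0:
--             if min_odd is None or x < min_odd:
--                 min_odd = x
--         elif x != m:
--             if max_even is None or x > max_even:
--                 max_even = x
--     if min_odd is None:
--         return 0
--     if max_even is not None and max_even > min_odd:
--         return 0
--     return 1
-- ===== Notes on version B (the rewrite author's own statement) =====
-- stated objective: alternative
-- what changed: Replaces A's two list comprehensions plus nested odd/even comparison loops by a single pass that tracks only the maximum non-max even value and the minimum odd value and compares them once (worst-case O(n) vs A's O(n^2), but A's early returns make the two comparable on typical inputs).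
import Mathlib
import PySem

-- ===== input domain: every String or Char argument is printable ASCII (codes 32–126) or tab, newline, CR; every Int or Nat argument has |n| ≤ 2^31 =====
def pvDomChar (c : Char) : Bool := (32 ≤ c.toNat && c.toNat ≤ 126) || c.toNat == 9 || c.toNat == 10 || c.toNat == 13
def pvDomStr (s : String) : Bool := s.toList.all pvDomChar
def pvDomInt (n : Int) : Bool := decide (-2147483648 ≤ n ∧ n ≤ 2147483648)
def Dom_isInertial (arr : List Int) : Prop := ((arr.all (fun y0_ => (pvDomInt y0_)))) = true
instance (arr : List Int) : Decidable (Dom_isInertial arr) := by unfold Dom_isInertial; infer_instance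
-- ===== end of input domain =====

-- B replaces A's nested odd/even comparison loops by a single pass tracking the
-- maximum non-max even value and the minimum odd value (objective: alternative).

-- ===== PORT A =====
-- inner 'for even in even_vals: if even > odd: return 0' loop
def pvInnerA (odd : Int) : List Int → Bool
  | [] => false
  | e :: rest => if e > odd then true else pvInnerA odd rest

-- outer 'for odd in odd_vals' loop
def pvOuterA (evens : List Int) : List Int → Bool
  | [] => false
  | o :: rest => if pvInnerA o evens then true else pvOuterA evens rest

def isInertial (arr : List Int) : Int :=
  if arr.length < 2 then 0
  else
    match PySem.List.max? arr (fun y => y) with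
    | none => 0  -- unreachable: arr has ≥ 2 elements
    | some m =>
      if PySem.Int.mod m 2 ≠ 0 then 0
      else
        let even_vals := arr.filter (fun i => PySem.Int.mod i 2 == 0 && i != m)
        let odd_vals := arr.filter (fun i => PySem.Int.mod i 2 != 0)
        if odd_vals.isEmpty then 0
        else if pvOuterA even_vals odd_vals then 0 else 1

-- ===== PORT B =====
-- single-pass loop body: state = (max_even, min_odd)
def pvStepB (m : Int) (s : Option Int × Option Int) (x : Int) : Option Int × Option Int :=
  if PySem.Int.mod x 2 ≠ 0 then
    (s.1, some (match s.2 with | none => x | some b => if x < b then x else b))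
  else if x ≠ m then
    (some (match s.1 with | none => x | some a => if x > a then x else a), s.2)
  else s

def isInertial_alt (arr : List Int) : Int :=
  if arr.length < 2 then 0
  else
    match PySem.List.max? arr (fun y => y) with
    | none => 0  -- unreachable: arr has ≥ 2 elements
    | some m =>
      if PySem.Int.mod m 2 ≠ 0 then 0
      else
        let st := arr.foldl (pvStepB m) (none, none)
        match st.2 with
        | none => 0
        | some mo =>
          match st.1 with
          | some me => if me > mo then 0 else 1
          | none => 1

-- ===== PRECONDITION & SPEC =====
def Spec_isInertial (arr : List Int) (out : Int) : Prop := out = isInertial_alt arr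
instance (arr : List Int) (out : Int) : Decidable (Spec_isInertial arr out) := by unfold Spec_isInertial; infer_instance

-- ===== CLAIM (what is proved, stated in full; the proofs are below) =====
def Claim_equal_isInertial : Prop := ∀ (arr : List Int), Dom_isInertial arr → Spec_isInertial arr (isInertial arr)

-- ===== LEMMAS AND PROOFS =====

-- running-min / running-max accumulators (what B's loop maintains per component)
def pvFoldMin (acc : Option Int) : List Int → Option Int
  | [] => acc
  | x :: xs => pvFoldMin (some (match acc with | none => x | some b => if x < b then x else b)) xs

def pvFoldMax (acc : Option Int) : List Int → Option Int
  | [] => acc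
  | x :: xs => pvFoldMax (some (match acc with | none => x | some a => if x > a then x else a)) xs

lemma pvStep_split (m : Int) : ∀ (l : List Int) (me mo : Option Int),
    l.foldl (pvStepB m) (me, mo)
      = (pvFoldMax me (l.filter (fun i => PySem.Int.mod i 2 == 0 && i != m)),
         pvFoldMin mo (l.filter (fun i => PySem.Int.mod i 2 != 0))) := by
  intro l
  induction l with
  | nil => intro me mo; rfl
  | cons x xs ih =>
    intro me mo
    rw [List.foldl_cons]
    by_cases hodd : PySem.Int.mod x 2 ≠ 0
    · have hb1 : (PySem.Int.mod x 2 != 0) = true := by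
        rw [bne_iff_ne]; exact hodd
      have hb2 : (PySem.Int.mod x 2 == 0 && x != m) = false := by
        rw [Bool.and_eq_false_iff]; left; rw [beq_eq_false_iff_ne]; exact hodd
      have hfe : (x :: xs).filter (fun i => PySem.Int.mod i 2 == 0 && i != m)
          = xs.filter (fun i => PySem.Int.mod i 2 == 0 && i != m) :=
        List.filter_cons_of_neg (by rw [hb2]; exact Bool.false_ne_true)
      have hfo : (x :: xs).filter (fun i => PySem.Int.mod i 2 != 0)
          = x :: xs.filter (fun i => PySem.Int.mod i 2 != 0) :=
        List.filter_cons_of_pos hb1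
      rw [hfe, hfo]
      show List.foldl (pvStepB m) (pvStepB m (me, mo) x) xs = _
      rw [pvStepB, if_pos hodd, ih]
      simp only [pvFoldMin]
    · push_neg at hodd
      have hb1 : (PySem.Int.mod x 2 != 0) = false := by
        rw [bne_eq_false_iff_eq]; exact hodd
      have hfo : (x :: xs).filter (fun i => PySem.Int.mod i 2 != 0)
          = xs.filter (fun i => PySem.Int.mod i 2 != 0) :=
        List.filter_cons_of_neg (by rw [hb1]; exact Bool.false_ne_true)
      rw [hfo]
      by_cases hm : x = m
      · have hb2 : (PySem.Int.mod x 2 == 0 && x != m) = false := by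
          rw [Bool.and_eq_false_iff]; right; rw [bne_eq_false_iff_eq]; exact hm
        have hfe : (x :: xs).filter (fun i => PySem.Int.mod i 2 == 0 && i != m)
            = xs.filter (fun i => PySem.Int.mod i 2 == 0 && i != m) :=
          List.filter_cons_of_neg (by rw [hb2]; exact Bool.false_ne_true)
        rw [hfe]
        show List.foldl (pvStepB m) (pvStepB m (me, mo) x) xs = _
        rw [pvStepB, if_neg (by simp only [ne_eq, hodd, not_true_eq_false, not_false_eq_true]), if_neg (by simpa using hm)]
        exact ih me mo
      · have hb2 : (PySem.Int.mod x 2 == 0 && x != m) = true := by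
          rw [Bool.and_eq_true]; exact ⟨by rw [beq_iff_eq]; exact hodd, by rw [bne_iff_ne]; exact hm⟩
        have hfe : (x :: xs).filter (fun i => PySem.Int.mod i 2 == 0 && i != m)
            = x :: xs.filter (fun i => PySem.Int.mod i 2 == 0 && i != m) :=
          List.filter_cons_of_pos hb2
        rw [hfe]
        show List.foldl (pvStepB m) (pvStepB m (me, mo) x) xs = _
        rw [pvStepB, if_neg (by simp only [ne_eq, hodd, not_true_eq_false, not_false_eq_true]), if_pos hm]
        rw [ih]
        simp only [pvFoldMax]

lemma pvFoldMin_none : ∀ (l : List Int) (acc : Option Int),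
    pvFoldMin acc l = none ↔ acc = none ∧ l = [] := by
  intro l
  induction l with
  | nil => intro acc; simp [pvFoldMin]
  | cons x xs ih =>
    intro acc
    simp [pvFoldMin, ih]

lemma pvFoldMax_none : ∀ (l : List Int) (acc : Option Int),
    pvFoldMax acc l = none ↔ acc = none ∧ l = [] := by
  intro l
  induction l with
  | nil => intro acc; simp [pvFoldMax]
  | cons x xs ih =>
    intro acc
    simp [pvFoldMax, ih]

lemma pvFoldMin_spec : ∀ (l : List Int) (acc : Option Int) (b : Int),
    pvFoldMin acc l = some b →
      (b ∈ l ∨ acc = some b) ∧ (∀ o ∈ l, b ≤ o) ∧ (∀ a, acc = some a → b ≤ a) := by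
  intro l
  induction l with
  | nil => intro acc b h; simp [pvFoldMin] at h; simp [h]
  | cons x xs ih =>
    intro acc b h
    simp only [pvFoldMin] at h
    obtain ⟨hmem, hle, hacc⟩ := ih _ _ h
    cases acc with
    | none =>
      have hbx : b ≤ x := hacc x rfl
      refine ⟨?_, ?_, ?_⟩
      · rcases hmem with hb | hb
        · exact Or.inl (List.mem_cons_of_mem _ hb)
        · simp at hb; subst hb; exact Or.inl (List.mem_cons_self)
      · intro o ho
        rcases List.mem_cons.mp ho with rfl | ho
        · exact hbx
        · exact hle o ho
      · intro a ha; cases ha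
    | some a =>
      by_cases hxa : x < a
      · simp only [hxa, if_pos] at hacc hmem
        have hbx : b ≤ x := hacc x (by simp [hxa])
        refine ⟨?_, ?_, ?_⟩
        · rcases hmem with hb | hb
          · exact Or.inl (List.mem_cons_of_mem _ hb)
          · simp [hxa] at hb; subst hb; exact Or.inl (List.mem_cons_self)
        · intro o ho
          rcases List.mem_cons.mp ho with rfl | ho
          · exact hbx
          · exact hle o ho
        · intro a' ha'
          injection ha' with ha'; subst ha'
          exact le_trans hbx (le_of_lt hxa)
      · have hba : b ≤ a := hacc a (by simp [hxa])
        refine ⟨?_, ?_, ?_⟩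
        · rcases hmem with hb | hb
          · exact Or.inl (List.mem_cons_of_mem _ hb)
          · simp [hxa] at hb; subst hb; exact Or.inr rfl
        · intro o ho
          rcases List.mem_cons.mp ho with rfl | ho
          · exact le_trans hba (not_lt.mp hxa)
          · exact hle o ho
        · intro a' ha'
          injection ha' with ha'; subst ha'; exact hba

lemma pvFoldMax_spec : ∀ (l : List Int) (acc : Option Int) (b : Int),
    pvFoldMax acc l = some b →
      (b ∈ l ∨ acc = some b) ∧ (∀ o ∈ l, o ≤ b) ∧ (∀ a, acc = some a → a ≤ b) := by
  intro l
  induction l with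
  | nil => intro acc b h; simp [pvFoldMax] at h; simp [h]
  | cons x xs ih =>
    intro acc b h
    simp only [pvFoldMax] at h
    obtain ⟨hmem, hle, hacc⟩ := ih _ _ h
    cases acc with
    | none =>
      have hbx : x ≤ b := hacc x rfl
      refine ⟨?_, ?_, ?_⟩
      · rcases hmem with hb | hb
        · exact Or.inl (List.mem_cons_of_mem _ hb)
        · simp at hb; subst hb; exact Or.inl (List.mem_cons_self)
      · intro o ho
        rcases List.mem_cons.mp ho with rfl | ho
        · exact hbx
        · exact hle o ho
      · intro a ha; cases ha
    | some a =>
      by_cases hxa : x > a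
      · simp only [hxa, if_pos] at hacc hmem
        have hbx : x ≤ b := hacc x (by simp [hxa])
        refine ⟨?_, ?_, ?_⟩
        · rcases hmem with hb | hb
          · exact Or.inl (List.mem_cons_of_mem _ hb)
          · simp [hxa] at hb; subst hb; exact Or.inl (List.mem_cons_self)
        · intro o ho
          rcases List.mem_cons.mp ho with rfl | ho
          · exact hbx
          · exact hle o ho
        · intro a' ha'
          injection ha' with ha'; subst ha'
          exact le_trans (le_of_lt hxa) hbx
      · have hba : a ≤ b := hacc a (by simp [hxa])
        refine ⟨?_, ?_, ?_⟩
        · rcases hmem with hb | hb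
          · exact Or.inl (List.mem_cons_of_mem _ hb)
          · simp [hxa] at hb; subst hb; exact Or.inr rfl
        · intro o ho
          rcases List.mem_cons.mp ho with rfl | ho
          · exact le_trans (not_lt.mp hxa) hba
          · exact hle o ho
        · intro a' ha'
          injection ha' with ha'; subst ha'; exact hba

lemma pvInnerA_any (o : Int) (l : List Int) :
    pvInnerA o l = l.any (fun e => decide (o < e)) := by
  induction l with
  | nil => simp [pvInnerA]
  | cons x xs ih => by_cases h : o < x <;> simp [pvInnerA, h, ih]

lemma pvOuterA_any (evens : List Int) (l : List Int) :
    pvOuterA evens l = l.any (fun o => pvInnerA o evens) := by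
  induction l with
  | nil => simp [pvOuterA]
  | cons x xs ih => by_cases h : pvInnerA x evens = true <;> simp [pvOuterA, h, ih]

lemma pvOuterA_iff (evens : List Int) (l : List Int) :
    pvOuterA evens l = true ↔ ∃ o ∈ l, ∃ e ∈ evens, o < e := by
  simp [pvOuterA_any, pvInnerA_any, List.any_eq_true]

theorem pv_main (arr : List Int) : isInertial arr = isInertial_alt arr := by
  unfold isInertial isInertial_alt
  by_cases hlen : arr.length < 2
  · rw [if_pos hlen, if_pos hlen]
  · rw [if_neg hlen, if_neg hlen]
    cases hmax : PySem.List.max? arr (fun y => y) with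
    | none => rfl
    | some m =>
      show (if PySem.Int.mod m 2 ≠ 0 then (0 : Int)
            else if (arr.filter (fun i => PySem.Int.mod i 2 != 0)).isEmpty then (0 : Int)
            else if pvOuterA (arr.filter (fun i => PySem.Int.mod i 2 == 0 && i != m))
                     (arr.filter (fun i => PySem.Int.mod i 2 != 0)) then 0 else 1)
          = (if PySem.Int.mod m 2 ≠ 0 then (0 : Int)
             else match (arr.foldl (pvStepB m) (none, none)).2 with
               | none => (0 : Int)
               | some mo =>
                 match (arr.foldl (pvStepB m) (none, none)).1 with
                 | some me => if me > mo then 0 else 1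
                 | none => 1)
      by_cases hmod : PySem.Int.mod m 2 ≠ 0
      · rw [if_pos hmod, if_pos hmod]
      · rw [if_neg hmod, if_neg hmod]
        rw [pvStep_split]
        cases hmin : pvFoldMin none (arr.filter (fun i => PySem.Int.mod i 2 != 0)) with
        | none =>
          have hempty : arr.filter (fun i => PySem.Int.mod i 2 != 0) = [] :=
            ((pvFoldMin_none _ none).mp hmin).2
          rw [hempty]
          rfl
        | some mo =>
          have hodne : ¬(arr.filter (fun i => PySem.Int.mod i 2 != 0)).isEmpty = true := by
            intro h
            rw [List.isEmpty_iff.mp h] at hmin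
            simp [pvFoldMin] at hmin
          rw [if_neg hodne]
          obtain ⟨hmoMem, hmoLe, -⟩ := pvFoldMin_spec _ none mo hmin
          have hmoMem' : mo ∈ arr.filter (fun i => PySem.Int.mod i 2 != 0) := by
            rcases hmoMem with h | h
            · exact h
            · simp at h
          cases hmaxE : pvFoldMax none (arr.filter (fun i => PySem.Int.mod i 2 == 0 && i != m)) with
          | none =>
            have hev0 : arr.filter (fun i => PySem.Int.mod i 2 == 0 && i != m) = [] :=
              ((pvFoldMax_none _ none).mp hmaxE).2
            have houter : pvOuterA (arr.filter (fun i => PySem.Int.mod i 2 == 0 && i != m))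
                (arr.filter (fun i => PySem.Int.mod i 2 != 0)) = false := by
              rw [hev0, pvOuterA_any]
              simp [pvInnerA]
            rw [houter]
            rfl
          | some me =>
            obtain ⟨hmeMem, hmeGe, -⟩ := pvFoldMax_spec _ none me hmaxE
            have hmeMem' : me ∈ arr.filter (fun i => PySem.Int.mod i 2 == 0 && i != m) := by
              rcases hmeMem with h | h
              · exact h
              · simp at h
            by_cases hgt : me > mo
            · have houter : pvOuterA (arr.filter (fun i => PySem.Int.mod i 2 == 0 && i != m))
                  (arr.filter (fun i => PySem.Int.mod i 2 != 0)) = true := by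
                rw [pvOuterA_iff]
                exact ⟨mo, hmoMem', me, hmeMem', hgt⟩
              rw [houter]
              exact (if_pos hgt).symm
            · have houter : pvOuterA (arr.filter (fun i => PySem.Int.mod i 2 == 0 && i != m))
                  (arr.filter (fun i => PySem.Int.mod i 2 != 0)) = false := by
                rw [Bool.eq_false_iff]
                intro hcon
                rcases (pvOuterA_iff _ _).mp hcon with ⟨o, ho, e, he, holt⟩
                exact hgt (lt_of_le_of_lt (hmoLe o ho) (lt_of_lt_of_le holt (hmeGe e he)))
              rw [houter]
              exact (if_neg hgt).symm

-- ===== VERDICT (by name: the statement is the Claim_ definition above) =====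
theorem isInertial_spec : Claim_equal_isInertial := by
  intro arr _
  unfold Spec_isInertial
  exact pv_main arr
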